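-- pv_equiv track=rewrite | github.com/gcctbilly/Assignment_code | Assignment/COMP1001_Project/G66_1002.py | isDirectSource
-- ===== SOURCE A (Python) =====
-- whole_data = {'userx': {'passwordx': {'name': 'X', 'friends': ['Y','W'], 'articles': {'A2' : { 'content': 'contentA2', 'quote': 'A1'} } } },
--               'userw': {'passwordw': {'name': 'W', 'friends': ['Y','X'], 'articles': {'A3' : { 'content': 'contentA3', 'quote': 'A2'}, 'A1': { 'content': 'contentA1',  'quote': ''} } } },
--               'usery': {'passwordy': {'name': 'Y', 'friends': ['Z','W','X'], 'articles': {'A5' : { 'content': 'contentA5', 'quote': 'A1'} } } },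
--               'userz': {'passwordz': {'name': 'Z', 'friends': ['Y'], 'articles': {'A4' : { 'content': 'contentA4', 'quote': 'A2'} } } }
--                        }
--
-- username_to_password = {'userx' : 'passwordx', 'userw': 'passwordw', 'usery': 'passwordy', 'userz': 'passwordz' }
--
-- def isDirectSource(A,B):
--     '''
--     The user needs to input A and B, and the system will judge whether A is the direct source of B. If it is, return true. If not, it will return false.
--     '''
--     data_base = whole_data       #saven the message
--     username_to_p = username_to_password
--     for username in data_base:        #user's password
--         password = username_to_p[username]
--         if B in data_base[username][password]['articles']:   #find B's location
--             if A in data_base[username][password]['articles'][B]['quote']:      #find A's location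
--                 return True
--             else:
--                 return False
-- ===== SOURCE B (Python) =====
-- whole_data = {'userx': {'passwordx': {'name': 'X', 'friends': ['Y','W'], 'articles': {'A2' : { 'content': 'contentA2', 'quote': 'A1'} } } },
--               'userw': {'passwordw': {'name': 'W', 'friends': ['Y','X'], 'articles': {'A3' : { 'content': 'contentA3', 'quote': 'A2'}, 'A1': { 'content': 'contentA1',  'quote': ''} } } },
--               'usery': {'passwordy': {'name': 'Y', 'friends': ['Z','W','X'], 'articles': {'A5' : { 'content': 'contentA5', 'quote': 'A1'} } } },
--               'userz': {'passwordz': {'name': 'Z', 'friends': ['Y'], 'articles': {'A4' : { 'content': 'contentA4', 'quote': 'A2'} } } }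
--                        }
--
-- username_to_password = {'userx' : 'passwordx', 'userw': 'passwordw', 'usery': 'passwordy', 'userz': 'passwordz' }
--
-- def _quote_index():
--     '''Flat index: article name -> its quote string, over all users.'''
--     index = {}
--     for creds in whole_data.values():
--         for info in creds.values():
--             index.update(info['articles'].items())
--     return {name: art['quote'] for name, art in index.items()}
--
-- def isDirectSource(A, B):
--     '''
--     The user needs to input A and B, and the system will judge whether A is the direct source of B. If it is, return true. If not, it will return false.
--     '''
--     index = _quote_index()
--     if B in index:
--         return A in index[B]
-- ===== Notes on version B (the rewrite author's own statement) =====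
-- stated objective: simpler
-- what changed: Replaced the per-user loop with its in-loop membership-and-branch by a flat article-name->quote index built once from the nested data, followed by a single lookup and substring test (implicit None preserved when B is not an article).
import Mathlib
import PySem

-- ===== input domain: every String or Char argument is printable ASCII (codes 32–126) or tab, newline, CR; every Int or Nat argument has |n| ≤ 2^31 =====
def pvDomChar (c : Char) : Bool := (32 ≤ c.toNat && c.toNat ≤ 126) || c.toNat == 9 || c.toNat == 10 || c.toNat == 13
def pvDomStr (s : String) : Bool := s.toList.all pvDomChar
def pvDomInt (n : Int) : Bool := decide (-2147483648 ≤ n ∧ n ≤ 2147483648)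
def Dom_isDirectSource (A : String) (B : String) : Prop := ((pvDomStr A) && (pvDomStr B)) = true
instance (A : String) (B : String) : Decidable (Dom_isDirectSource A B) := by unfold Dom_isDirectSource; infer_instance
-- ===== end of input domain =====

-- B replaces A's per-user conditional scan by a flat article→quote index built once, then a single lookup (objective: simpler).

-- shared data model: the module-level constants of the Python file
structure PvArticle where
  content : String
  quote : String
deriving DecidableEq, Repr

structure PvUser where
  name : String
  friends : List String
  articles : PySem.Dict String PvArticle
deriving DecidableEq, Repr

def pvWholeData : PySem.Dict String (PySem.Dict String PvUser) :=
  PySem.Dict.ofList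
    [ ("userx", PySem.Dict.ofList [("passwordx", ⟨"X", ["Y","W"], PySem.Dict.ofList [("A2", ⟨"contentA2", "A1"⟩)]⟩)]),
      ("userw", PySem.Dict.ofList [("passwordw", ⟨"W", ["Y","X"], PySem.Dict.ofList [("A3", ⟨"contentA3", "A2"⟩), ("A1", ⟨"contentA1", ""⟩)]⟩)]),
      ("usery", PySem.Dict.ofList [("passwordy", ⟨"Y", ["Z","W","X"], PySem.Dict.ofList [("A5", ⟨"contentA5", "A1"⟩)]⟩)]),
      ("userz", PySem.Dict.ofList [("passwordz", ⟨"Z", ["Y"], PySem.Dict.ofList [("A4", ⟨"contentA4", "A2"⟩)]⟩)]) ]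

def pvUsernameToPassword : PySem.Dict String String :=
  PySem.Dict.ofList [("userx", "passwordx"), ("userw", "passwordw"), ("usery", "passwordy"), ("userz", "passwordz")]

-- ===== PORT A =====
-- the for-loop over data_base's usernames; the inner dict lookups never miss on the
-- fixed module data (so the `none` fall-throughs for a KeyError are unreachable)
def isDirectSourceLoop (A : String) (B : String) : List String → Option Bool
  | [] => none
  | username :: rest =>
    match PySem.Dict.get? pvUsernameToPassword username with
    | none => none
    | some password =>
      match PySem.Dict.get? pvWholeData username with
      | none => none
      | some creds =>
        match PySem.Dict.get? creds password with
        | none => none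
        | some info =>
          if PySem.Dict.contains info.articles B then
            match PySem.Dict.get? info.articles B with
            | none => none
            | some art => some (PySem.Str.isIn A art.quote)
          else
            isDirectSourceLoop A B rest

def isDirectSource (A : String) (B : String) : Option Bool :=
  isDirectSourceLoop A B (PySem.Dict.keys pvWholeData)

-- ===== PORT B =====
-- flat index over all users' articles, built once, then one lookup
def pvQuoteIndex : PySem.Dict String String :=
  let index : PySem.Dict String PvArticle :=
    (PySem.Dict.values pvWholeData).foldl
      (fun idx creds =>
        (PySem.Dict.values creds).foldl
          (fun idx info => PySem.Dict.update idx (PySem.Dict.items info.articles)) idx)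
      PySem.Dict.empty
  PySem.Dict.ofList ((PySem.Dict.items index).map (fun p => (p.1, p.2.quote)))

def isDirectSource_alt (A : String) (B : String) : Option Bool :=
  match PySem.Dict.get? pvQuoteIndex B with
  | some q => some (PySem.Str.isIn A q)
  | none => none

-- ===== PRECONDITION & SPEC =====
def Spec_isDirectSource (A : String) (B : String) (out : Option Bool) : Prop := out = isDirectSource_alt A B
instance (A : String) (B : String) (out : Option Bool) : Decidable (Spec_isDirectSource A B out) := by unfold Spec_isDirectSource; infer_instance

-- ===== CLAIM (what is proved, stated in full; the proofs are below) =====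
def Claim_equal_isDirectSource : Prop := ∀ (A : String) (B : String), Dom_isDirectSource A B → Spec_isDirectSource A B (isDirectSource A B)

-- ===== LEMMAS AND PROOFS =====

-- ===== VERDICT (by name: the statement is the Claim_ definition above) =====
theorem isDirectSource_spec : Claim_equal_isDirectSource := by
  intro A B _
  unfold Spec_isDirectSource
  by_cases h2 : B = "A2" <;> by_cases h3 : B = "A3" <;> by_cases h1 : B = "A1" <;>
    by_cases h5 : B = "A5" <;> by_cases h4 : B = "A4" <;>
  simp_all [isDirectSource, isDirectSourceLoop, isDirectSource_alt, pvQuoteIndex,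
    pvWholeData, pvUsernameToPassword, PySem.Dict.ofList, PySem.Dict.empty,
    PySem.Dict.keys,
    PySem.Dict.values, PySem.Dict.update, PySem.Dict.insert,
    PySem.Dict.contains, PySem.Dict.get?, List.foldl]
  simp [List.find?, show ("A2" == B) = false by simp [Ne.symm h2],
    show ("A3" == B) = false by simp [Ne.symm h3], show ("A1" == B) = false by simp [Ne.symm h1],
    show ("A5" == B) = false by simp [Ne.symm h5], show ("A4" == B) = false by simp [Ne.symm h4]]
  simp [Ne.symm h2, Ne.symm h3, Ne.symm h1, Ne.symm h5, Ne.symm h4]
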